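-- pv_equiv track=rewrite | github.com/nickramos94/DataStructuresAndAlgorithmsInPython | C05ArrayBasedSequences/Projects/p32.py | add_3d
-- ===== SOURCE A (Python) =====
-- def add_3d(tensor1, tensor2):
--     tensor3 = []
--     for matrix1, matrix2 in zip(tensor1, tensor2):
--         matrix3 = []
--         for row1, row2 in zip(matrix1, matrix2):
--             row3 = []
--             for elem1, elem2 in zip(row1, row2):
--                 elem3 = elem1 + elem2
--                 row3.append(elem3)
--             matrix3.append(row3)
--         tensor3.append(matrix3)
--     return tensor3
-- ===== SOURCE B (Python) =====
-- def add_3d(tensor1, tensor2):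
--     def zip_with(comb, a, b):
--         if not a or not b:
--             return []
--         return [comb(a[0], b[0])] + zip_with(comb, a[1:], b[1:])
--
--     def add_rows(row1, row2):
--         return zip_with(lambda x, y: x + y, row1, row2)
--
--     def add_mats(m1, m2):
--         return zip_with(add_rows, m1, m2)
--
--     return zip_with(add_mats, tensor1, tensor2)
-- ===== Notes on version B (the rewrite author's own statement) =====
-- stated objective: alternative
-- what changed: Replaces the three explicit nested append-accumulating loops with one generic recursive zip-with combinator applied at each of the three nesting levels.
import Mathlib
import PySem

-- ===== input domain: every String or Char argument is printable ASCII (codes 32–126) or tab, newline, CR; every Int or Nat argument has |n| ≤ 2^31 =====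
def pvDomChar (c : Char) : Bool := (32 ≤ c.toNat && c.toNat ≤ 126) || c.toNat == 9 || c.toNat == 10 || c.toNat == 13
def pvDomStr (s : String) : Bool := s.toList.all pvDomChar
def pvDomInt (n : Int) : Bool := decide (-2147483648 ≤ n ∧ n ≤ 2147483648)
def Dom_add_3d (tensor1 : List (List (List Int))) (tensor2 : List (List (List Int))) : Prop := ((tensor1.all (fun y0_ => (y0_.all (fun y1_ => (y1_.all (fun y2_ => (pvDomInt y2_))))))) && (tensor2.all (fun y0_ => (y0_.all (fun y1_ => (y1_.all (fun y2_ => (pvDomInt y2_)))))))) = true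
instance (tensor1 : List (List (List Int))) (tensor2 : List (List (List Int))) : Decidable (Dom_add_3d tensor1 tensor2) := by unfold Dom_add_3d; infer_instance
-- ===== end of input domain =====

-- B replaces A's three nested append-accumulating loops by one generic recursive
-- zip-with combinator used at each of the three nesting levels (objective: alternative).

-- ===== PORT A =====
-- three nested loops over zip, each appending to its accumulator
def add_3d (tensor1 : List (List (List Int))) (tensor2 : List (List (List Int))) : List (List (List Int)) :=
  (tensor1.zip tensor2).foldl (fun tensor3 m12 =>
    tensor3 ++ [ (m12.1.zip m12.2).foldl (fun matrix3 r12 =>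
      matrix3 ++ [ (r12.1.zip r12.2).foldl (fun row3 e12 =>
        row3 ++ [e12.1 + e12.2]) [] ]) [] ]) []

-- ===== PORT B =====
-- generic recursive zip-with combinator (Source B's zip_with)
def pvZipWith {α β γ : Type} (comb : α → β → γ) : List α → List β → List γ
  | a :: as, b :: bs => comb a b :: pvZipWith comb as bs
  | _, _ => []

def add_3d_alt (tensor1 : List (List (List Int))) (tensor2 : List (List (List Int))) : List (List (List Int)) :=
  pvZipWith (fun m1 m2 => pvZipWith (fun r1 r2 => pvZipWith (fun x y : Int => x + y) r1 r2) m1 m2) tensor1 tensor2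

-- ===== PRECONDITION & SPEC =====
def Spec_add_3d (tensor1 : List (List (List Int))) (tensor2 : List (List (List Int))) (out : List (List (List Int))) : Prop := out = add_3d_alt tensor1 tensor2
instance (tensor1 : List (List (List Int))) (tensor2 : List (List (List Int))) (out : List (List (List Int))) : Decidable (Spec_add_3d tensor1 tensor2 out) := by unfold Spec_add_3d; infer_instance

-- ===== CLAIM (what is proved, stated in full; the proofs are below) =====
def Claim_equal_add_3d : Prop := ∀ (tensor1 : List (List (List Int))) (tensor2 : List (List (List Int))), Dom_add_3d tensor1 tensor2 → Spec_add_3d tensor1 tensor2 (add_3d tensor1 tensor2)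

-- ===== LEMMAS AND PROOFS =====

-- A's append-accumulating loop over a zip computes acc ++ zipWith
theorem foldl_zip_append {α β γ : Type} (f : α × β → γ) :
    ∀ (xs : List α) (ys : List β) (acc : List γ),
      (xs.zip ys).foldl (fun a p => a ++ [f p]) acc = acc ++ pvZipWith (fun x y => f (x, y)) xs ys := by
  intro xs
  induction xs with
  | nil => intro ys acc; simp [pvZipWith]
  | cons x xs ih =>
    intro ys acc
    cases ys with
    | nil => simp [pvZipWith]
    | cons y ys =>
      simp only [List.zip_cons_cons, List.foldl_cons, pvZipWith, ih]
      simp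

-- ===== VERDICT (by name: the statement is the Claim_ definition above) =====
theorem add_3d_spec : Claim_equal_add_3d := by
  intro t1 t2 _
  unfold Spec_add_3d add_3d add_3d_alt
  rw [foldl_zip_append (f := fun m12 : List (List Int) × List (List Int) =>
        (m12.1.zip m12.2).foldl (fun matrix3 r12 =>
          matrix3 ++ [ (r12.1.zip r12.2).foldl (fun row3 e12 => row3 ++ [e12.1 + e12.2]) [] ]) [])]
  simp only [List.nil_append]
  congr 1
  funext m1 m2
  rw [foldl_zip_append (f := fun r12 : List Int × List Int =>
        (r12.1.zip r12.2).foldl (fun row3 e12 => row3 ++ [e12.1 + e12.2]) [])]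
  simp only [List.nil_append]
  congr 1
  funext r1 r2
  rw [foldl_zip_append (f := fun e12 : Int × Int => e12.1 + e12.2)]
  simp
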